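-- pv_equiv track=rewrite | github.com/Jany26/tree-aut-lib | py/experiments/simulation.py | assign_variables_dict
-- ===== SOURCE A (Python) =====
-- def assign_variables_dict(num: int, size: int) -> dict[int, int]:
--     """
--     Create an int -> int (variable index -> 0/1 = true/false) dictionary from a number.
--     Needed in semantic checking based on evaluating all variable assignments.
--     (Iterating through all numbers in a range of 2 ^ (variable count)).
--     if an ABDD has a variable range of size 10, this function is used 2^10 times
--     """
--     result: list[int] = []
--     division: int = num
--     for _ in range(size):
--         remainder: int = division % 2
--         division = division // 2
--         result.append(remainder)
--     result.reverse()
--     return {i + 1: result[i] for i in range(size)}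
-- ===== SOURCE B (Python) =====
-- def assign_variables_dict(num: int, size: int) -> dict[int, int]:
--     # Each bit independently: key k (1-based, MSB first) gets bit (size - k) of num.
--     return {k: (num >> (size - k)) & 1 for k in range(1, size + 1)}
-- ===== Notes on version B (the rewrite author's own statement) =====
-- stated objective: simpler
-- what changed: Replaces the sequential division loop, intermediate list and reverse() with a single comprehension computing each bit independently as (num >> (size-k)) & 1.
import Mathlib
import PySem

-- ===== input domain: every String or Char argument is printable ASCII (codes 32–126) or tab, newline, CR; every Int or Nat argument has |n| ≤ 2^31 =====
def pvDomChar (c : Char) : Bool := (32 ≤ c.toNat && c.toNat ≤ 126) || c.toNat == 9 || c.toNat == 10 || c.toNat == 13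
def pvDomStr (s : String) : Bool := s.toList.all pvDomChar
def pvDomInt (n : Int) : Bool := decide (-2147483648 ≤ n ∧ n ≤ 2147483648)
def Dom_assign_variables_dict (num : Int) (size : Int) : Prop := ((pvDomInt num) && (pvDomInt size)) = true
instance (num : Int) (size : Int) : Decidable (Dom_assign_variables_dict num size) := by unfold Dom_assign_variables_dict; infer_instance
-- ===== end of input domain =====

-- B replaces A's sequential division loop + reverse() with a comprehension computing each bit
-- independently by shift-and-mask; same cost, simpler.

-- ===== PORT A =====
def assign_variables_dict (num : Int) (size : Int) : List (Int × Int) :=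
  -- result/division accumulated by the `for _ in range(size)` loop
  let st := (PySem.List.pyRange 0 size).foldl
      (fun (st : List Int × Int) _ =>
        (st.1 ++ [PySem.Int.mod st.2 2], PySem.Int.floordiv st.2 2))
      ([], num)
  let result := st.1.reverse
  -- result[i] with 0 ≤ i < size = len(result): always in range, so pyGetD is exact here
  (PySem.List.pyRange 0 size).map (fun i => (i + 1, PySem.List.pyGetD result i 0))

-- ===== PORT B =====
def assign_variables_dict_alt (num : Int) (size : Int) : List (Int × Int) :=
  -- {k: (num >> (size - k)) & 1 for k in range(1, size + 1)}; size - k ≥ 0 on this range,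
  -- so `.toNat` is exact for Python's shift amount
  (PySem.List.pyRange 1 (size + 1)).map
    (fun k => (k, PySem.Int.band (num >>> (size - k).toNat) 1))

-- ===== PRECONDITION & SPEC =====
def Spec_assign_variables_dict (num : Int) (size : Int) (out : List (Int × Int)) : Prop := out = assign_variables_dict_alt num size
instance (num : Int) (size : Int) (out : List (Int × Int)) : Decidable (Spec_assign_variables_dict num size out) := by unfold Spec_assign_variables_dict; infer_instance

-- ===== CLAIM (what is proved, stated in full; the proofs are below) =====
def Claim_equal_assign_variables_dict : Prop := ∀ (num : Int) (size : Int), Dom_assign_variables_dict num size → Spec_assign_variables_dict num size (assign_variables_dict num size)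

-- ===== LEMMAS AND PROOFS =====

-- A's loop: after m iterations, result holds the low-to-high bits and division = num // 2^m
-- A's loop over any list: result collects low-to-high bits, division = num // 2^len
lemma pvLoopA (l : List Int) : ∀ (acc : List Int) (d : Int),
    l.foldl
      (fun (st : List Int × Int) _ =>
        (st.1 ++ [PySem.Int.mod st.2 2], PySem.Int.floordiv st.2 2))
      (acc, d)
    = (acc ++ (List.range l.length).map (fun j : Nat => d / 2 ^ j % 2), d / 2 ^ l.length) := by
  induction l with
  | nil => simp
  | cons x l ih =>
    intro acc d
    rw [List.foldl_cons, ih]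
    simp only [List.length_cons,
      PySem.Int.mod_eq_emod_of_pos (b := 2) (by norm_num),
      PySem.Int.floordiv_eq_ediv_of_pos (b := 2) (by norm_num), Prod.mk.injEq]
    constructor
    · rw [List.append_assoc, List.range_succ_eq_map, List.map_cons, List.map_map]
      simp only [pow_zero, Int.ediv_one, List.singleton_append, Function.comp_def]
      congr 2
      refine List.map_congr_left fun j _ => ?_
      rw [Int.ediv_ediv_of_nonneg (by positivity : (0:Int) ≤ 2), ← pow_succ']
    · rw [Int.ediv_ediv_of_nonneg (by positivity : (0:Int) ≤ 2), ← pow_succ']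

lemma pvRangeOne (n : Nat) :
    PySem.List.pyRange 1 ((n : Int) + 1) = (List.range n).map (fun k : Nat => (k : Int) + 1) := by
  induction n with
  | zero => decide
  | succ m ih =>
    have h : (((m : Nat) + 1 : Nat) : Int) + 1 = ((m : Int) + 1) + 1 := by push_cast; ring
    rw [h, PySem.List.pyRange_one_succ_right (by omega), ih, List.range_succ, List.map_append]
    simp

lemma pvRevGetD (n i : Nat) (f : Nat → Int) (hi : i < n) :
    (((List.range n).map f).reverse).getD i 0 = f (n - 1 - i) := by
  rw [List.getD_eq_getElem _ _ (by simpa using hi)]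
  simp only [List.getElem_reverse, List.getElem_map, List.getElem_range, List.length_map,
    List.length_range]

-- ===== VERDICT (by name: the statement is the Claim_ definition above) =====
theorem assign_variables_dict_spec : Claim_equal_assign_variables_dict := by
  intro num size _
  unfold Spec_assign_variables_dict assign_variables_dict assign_variables_dict_alt
  by_cases hs : size ≤ 0
  · rw [PySem.List.pyRange_one_eq_nil hs, PySem.List.pyRange_one_eq_nil (by omega)]
    simp
  · obtain ⟨n, rfl⟩ : ∃ n : Nat, size = (n : Int) :=
      ⟨size.toNat, (Int.toNat_of_nonneg (by omega)).symm⟩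
    simp only [PySem.List.pyRange_zero_natCast, pvRangeOne, pvLoopA, List.nil_append,
      List.length_map, List.length_range, List.map_map]
    refine List.map_congr_left (fun j hj => ?_)
    have hjn : j < n := List.mem_range.mp hj
    simp only [Function.comp_apply, PySem.List.pyGetD_natCast, Prod.mk.injEq, true_and]
    rw [pvRevGetD n j _ hjn]
    have ht : ((n : Int) - ((j : Int) + 1)).toNat = n - 1 - j := by omega
    rw [ht, PySem.Int.band_one, PySem.Int.mod_eq_emod_of_pos (by norm_num),
      Int.shiftRight_eq_div_pow]
    norm_cast
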